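-- pv_equiv track=rewrite | github.com/SiottoTamat/HLL_Stats_Tools | hll_stats_tools/legacy_json/json_utils.py | only_actual_game_logs
-- ===== SOURCE A (Python) =====
-- def only_actual_game_logs(game: dict) -> dict:
--     start_idx = -1
--     end_idx = -1
--     for index, log in enumerate(game["logs"]):
--         if log["type"] == "MATCH START":
--             start_idx = index
--         if log["type"] == "MATCH ENDED":
--             end_idx = index
--     game["logs"] = game["logs"][start_idx : end_idx + 1]
--     return game
-- ===== SOURCE B (Python) =====
-- def only_actual_game_logs(game: dict) -> dict:
--     logs = game["logs"]
--     types = [log["type"] for log in logs]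
--     rev = types[::-1]
--     n = len(types)
--     start_idx = n - 1 - rev.index("MATCH START") if "MATCH START" in types else -1
--     end_idx = n - 1 - rev.index("MATCH ENDED") if "MATCH ENDED" in types else -1
--     game["logs"] = logs[start_idx:end_idx + 1]
--     return game
-- ===== Notes on version B (the rewrite author's own statement) =====
-- stated objective: idiomatic
-- what changed: Replaces A's sentinel-tracking scan loop by a loop-free formulation: extract the type column, then compute each boundary as len-1 minus list.index on the reversed column (guarded by a membership test), with no index bookkeeping at all.
import Mathlib
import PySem

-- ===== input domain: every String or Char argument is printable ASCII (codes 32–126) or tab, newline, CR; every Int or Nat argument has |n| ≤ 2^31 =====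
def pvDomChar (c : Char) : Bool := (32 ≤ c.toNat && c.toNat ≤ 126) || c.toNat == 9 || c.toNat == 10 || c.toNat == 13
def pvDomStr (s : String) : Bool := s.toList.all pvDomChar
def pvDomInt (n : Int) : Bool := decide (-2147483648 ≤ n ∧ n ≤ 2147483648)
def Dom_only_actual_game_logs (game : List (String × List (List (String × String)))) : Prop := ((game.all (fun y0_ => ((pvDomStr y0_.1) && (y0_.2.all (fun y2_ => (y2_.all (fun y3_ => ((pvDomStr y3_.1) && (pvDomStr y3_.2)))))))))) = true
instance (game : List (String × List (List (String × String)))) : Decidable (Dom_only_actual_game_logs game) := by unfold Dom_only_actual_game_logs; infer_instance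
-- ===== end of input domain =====

-- B is loop-free: it extracts the type column and finds each boundary as len-1-index on the
-- reversed column, instead of A's sentinel-tracking scan (same cost; equivalence is about the
-- returned value — both Pythons also mutate game["logs"] identically).

-- log["type"] (total form; Pre_ guarantees the key is present)
def oaglType (log : List (String × String)) : String :=
  ((PySem.Dict.mk log).get? "type").getD ""

-- ===== PORT A =====
-- one iteration of A's forward 'for index, log in enumerate(...)' loop body
def oaglStepA (st : Int × Int) (p : Int × List (String × String)) : Int × Int :=
  (if oaglType p.2 = "MATCH START" then p.1 else st.1,
   if oaglType p.2 = "MATCH ENDED" then p.1 else st.2)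

def only_actual_game_logs (game : List (String × List (List (String × String)))) : List (String × List (List (String × String))) :=
  let logs := ((PySem.Dict.mk game).get? "logs").getD []
  let st := (PySem.List.enumerate logs 0).foldl oaglStepA (-1, -1)
  ((PySem.Dict.mk game).insert "logs" (PySem.List.slice logs (some st.1) (some (st.2 + 1)))).items

-- ===== PORT B =====
-- B's 'n - 1 - rev.index(t) if t in types else -1' (rev.index is guarded by the membership test)
def oaglFindB (types rev : List String) (t : String) : Int :=
  if t ∈ types then (types.length : Int) - 1 - ((PySem.List.index? rev t).getD 0 : Nat) else -1

def only_actual_game_logs_alt (game : List (String × List (List (String × String)))) : List (String × List (List (String × String))) :=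
  let logs := ((PySem.Dict.mk game).get? "logs").getD []
  let types := logs.map oaglType
  let rev := (PySem.List.slice? types none none (-1)).getD []
  let start_idx := oaglFindB types rev "MATCH START"
  let end_idx := oaglFindB types rev "MATCH ENDED"
  ((PySem.Dict.mk game).insert "logs" (PySem.List.slice logs (some start_idx) (some (end_idx + 1)))).items

-- ===== PRECONDITION & SPEC =====
-- Pre_ excludes exactly the inputs where the Python A raises KeyError: a missing "logs" key, or a log without a "type" key.
def Pre_only_actual_game_logs (game : List (String × List (List (String × String)))) : Prop :=
  ((PySem.Dict.mk game).get? "logs").isSome = true ∧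
  ∀ log ∈ ((PySem.Dict.mk game).get? "logs").getD [], ((PySem.Dict.mk log).get? "type").isSome = true
instance (game : List (String × List (List (String × String)))) : Decidable (Pre_only_actual_game_logs game) := by unfold Pre_only_actual_game_logs; infer_instance

def pvWitness_only_actual_game_logs : (List (String × List (List (String × String)))) :=
  [("logs", [[("type", "MATCH START")], [("type", "KILL")], [("type", "MATCH ENDED")]])]

def Spec_only_actual_game_logs (game : List (String × List (List (String × String)))) (out : List (String × List (List (String × String)))) : Prop := out = only_actual_game_logs_alt game
instance (game : List (String × List (List (String × String)))) (out : List (String × List (List (String × String)))) : Decidable (Spec_only_actual_game_logs game out) := by unfold Spec_only_actual_game_logs; infer_instance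

-- ===== CLAIM (what is proved, stated in full; the proofs are below) =====
def Claim_equal_only_actual_game_logs : Prop := ∀ (game : List (String × List (List (String × String)))), Dom_only_actual_game_logs game → Pre_only_actual_game_logs game → Spec_only_actual_game_logs game (only_actual_game_logs game)

-- ===== LEMMAS AND PROOFS =====

-- the last index i < n with types[i] = t, or -1 (the common characterisation of both versions)
def oaglLast (types : List String) (t : String) : Nat → Int
  | 0 => -1
  | n + 1 => if types.getD n "" = t then (n : Int) else oaglLast types t n

lemma oaglLast_append (xs : List String) (x : String) (t : String) :
    ∀ m, m ≤ xs.length → oaglLast (xs ++ [x]) t m = oaglLast xs t m := by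
  intro m
  induction m with
  | zero => intro _; rfl
  | succ n ih =>
    intro h
    have hn : n < xs.length := by omega
    simp only [oaglLast, List.getD, List.getElem?_append_left hn, ih (by omega)]
    rfl


lemma oaglEnum_append (xs : List (List (String × String))) (x : List (String × String)) :
    ∀ k : Int, PySem.List.enumerate (xs ++ [x]) k = PySem.List.enumerate xs k ++ [(k + xs.length, x)] := by
  induction xs with
  | nil => intro k; simp [PySem.List.enumerate_nil, PySem.List.enumerate_cons]
  | cons y ys ih =>
    intro k
    simp only [List.cons_append, PySem.List.enumerate_cons, ih (k + 1), List.length_cons,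
      List.cons.injEq, List.append_cancel_left_eq, List.cons.injEq, Prod.mk.injEq, and_true, true_and]
    push_cast
    omega

lemma oaglA_eq_last (logs : List (List (String × String))) :
    (PySem.List.enumerate logs 0).foldl oaglStepA (-1, -1)
      = (oaglLast (logs.map oaglType) "MATCH START" logs.length,
         oaglLast (logs.map oaglType) "MATCH ENDED" logs.length) := by
  induction logs using List.reverseRecOn with
  | nil => rfl
  | append_singleton xs x ih =>
    rw [oaglEnum_append xs x 0, List.foldl_append, ih]
    simp only [List.map_append, List.map_cons, List.map_nil, List.length_append,
      List.length_singleton, oaglLast, List.getD,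
      List.getElem?_append_right (by simp : (xs.map oaglType).length ≤ xs.length),
      List.length_map, Nat.sub_self, List.getElem?_cons_zero, Option.getD_some,
      oaglLast_append (xs.map oaglType) (oaglType x) _ xs.length (by simp), zero_add,
      List.foldl_cons, List.foldl_nil, oaglStepA]

lemma oaglB_eq_last (types : List String) (t : String) :
    oaglFindB types types.reverse t = oaglLast types t types.length := by
  induction types using List.reverseRecOn with
  | nil => rfl
  | append_singleton xs x ih =>
    unfold oaglFindB at *
    simp only [List.reverse_append, List.reverse_singleton, List.singleton_append,
      List.length_append, List.length_singleton, oaglLast, List.getD,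
      List.getElem?_append_right (le_refl xs.length), Nat.sub_self,
      List.getElem?_cons_zero, Option.getD_some,
      oaglLast_append xs x t xs.length (le_refl xs.length)]
    by_cases hx : x = t
    · subst hx
      rw [PySem.List.index?_cons_self]
      simp
    · rw [PySem.List.index?_cons_of_ne _ hx, if_neg hx]
      by_cases hm : t ∈ xs
      · have hs : (PySem.List.index? xs.reverse t).isSome := by
          rw [PySem.List.index?_isSome_iff]; simpa using hm
        obtain ⟨k, hk⟩ := Option.isSome_iff_exists.mp hs
        rw [hk] at ih ⊢
        rw [if_pos hm] at ih
        rw [if_pos (by simp [hm] : t ∈ xs ++ [x])]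
        rw [← ih]
        simp only [Option.map_some, Option.getD_some]
        push_cast
        ring
      · rw [if_neg (by simp [hm, Ne.symm hx] : ¬ t ∈ xs ++ [x])]
        rw [if_neg hm] at ih
        exact ih

-- ===== VERDICT (by name: the statement is the Claim_ definition above) =====
theorem only_actual_game_logs_spec : Claim_equal_only_actual_game_logs := by
  intro game _ _
  unfold Spec_only_actual_game_logs only_actual_game_logs only_actual_game_logs_alt
  simp only [PySem.List.slice?_none_none_neg_one, Option.getD_some]
  rw [oaglA_eq_last, oaglB_eq_last, oaglB_eq_last]
  simp [List.length_map]
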